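-- pv_equiv track=rewrite | github.com/FTPY-1992/CibersecurityBootcampGrok | 03_cifrado_clasico/vigenere_attack.py | find_repeated_sequences
-- ===== SOURCE A (Python) =====
-- def extract_sequences(text:str, length: int) -> list:
--     """
--     Extract all alphabetic sequences of given length from text.
--     :param text:
--     :param length:
--     :return: List of (sequence, starting positions)
--     """
--
--     text = text.upper()
--     seq_positions = {}
--
--     for i in range(len(text) - length + 1):
--         seq = text[i:i + length]
--         if seq.isalpha():
--             if seq in seq_positions:
--                 seq_positions[seq].append(i)
--             else:
--                 seq_positions[seq] = [i]
--
--     return [(seq,pos) for seq,pos in seq_positions.items() if len(pos) > 1]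
--
-- def calculate_distances(positions: list) -> list:
--     """
--     Calculate distances between consecutive repetitions in positions.
--     :param positions:
--     :return:
--     """
--     return [positions[k+1] - positions[k] for k in range(len(positions) - 1)]
--
-- def find_repeated_sequences(text: str, min_length: int = 3) -> dict:
--     """
--     Kasiski test: find repeated sequences and their distances.
--     Returns dict of sequence -> list of distances between repetitions.
--     :param text:
--     :param min_length:
--     :return:
--     """
--     sequences = {}
--
--     for length in range(min_length, min_length + 10):
--         seq_pos_list = extract_sequences(text, length)
--
--         for seq, positions in seq_pos_list:
--             distances = calculate_distances(positions)
--             if seq in sequences: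
--                 sequences[seq].append(distances)
--             else:
--                 sequences[seq] = distances
--
--     return sequences
-- ===== SOURCE B (Python) =====
-- def find_repeated_sequences(text: str, min_length: int = 3) -> dict:
--     """Kasiski test, re-decomposed: precompute the substring table once per length,
--     dedup the alphabetic substrings in first-appearance order, then gather each
--     key's positions in one scan and emit consecutive gaps via zip."""
--     t = text.upper()
--     n = len(t)
--     result = {}
--     for length in range(min_length, min_length + 10):
--         subs = [t[i:i + length] for i in range(n - length + 1)]
--         for seq in dict.fromkeys(s for s in subs if s.isalpha()):
--             positions = [i for i, s in zip(range(n - length + 1), subs) if s == seq]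
--             if len(positions) > 1:
--                 result[seq] = [b - a for a, b in zip(positions, positions[1:])]
--     return result
-- ===== Notes on version B (the rewrite author's own statement) =====
-- stated objective: alternative
-- what changed: Replaces A's per-length one-pass hash grouping (dict of seq->positions built while scanning, then a distance pass via indexing) by a per-length substring table deduplicated in first-appearance order (dict.fromkeys), one gathering scan per distinct key, and gaps taken by zipping the position list with its own tail.
-- outside the precondition, e.g. on find_repeated_sequences('b2B3', -3): A returns {'B': [2, [2]]}, B returns {'B': [2]}
import Mathlib
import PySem

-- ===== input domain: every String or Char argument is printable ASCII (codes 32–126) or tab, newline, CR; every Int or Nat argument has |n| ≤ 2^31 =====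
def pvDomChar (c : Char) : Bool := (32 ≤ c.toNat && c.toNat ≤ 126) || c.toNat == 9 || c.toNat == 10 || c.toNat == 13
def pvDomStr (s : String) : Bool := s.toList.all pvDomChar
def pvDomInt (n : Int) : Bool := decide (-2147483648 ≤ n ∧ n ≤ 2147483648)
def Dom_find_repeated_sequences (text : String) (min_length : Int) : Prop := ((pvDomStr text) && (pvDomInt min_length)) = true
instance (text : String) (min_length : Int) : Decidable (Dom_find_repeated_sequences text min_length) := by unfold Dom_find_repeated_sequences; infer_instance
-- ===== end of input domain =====

-- B replaces A's one-pass hash grouping by a per-length substring table that is deduplicated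
-- in first-appearance order, with each key's positions gathered in one scan and the gaps taken
-- by zipping the position list with its own tail (objective: alternative decomposition, same cost class).

-- ===== PORT A =====
-- extract_sequences: literal port. `seq_positions[seq].append(i)` is Dict.modify at an existing
-- key (in-place, keeps position), `seq_positions[seq] = [i]` is Dict.insert (appends a new key).
def extract_sequences (text : String) (length : Int) : List (String × List Int) :=
  let text := PySem.Str.upper text
  let seq_positions : PySem.Dict String (List Int) :=
    (PySem.List.pyRange 0 (PySem.Str.len text - length + 1)).foldl
      (fun d i =>
        let seq := PySem.Str.slice text (some i) (some (i + length))
        if PySem.Str.strIsalpha seq then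
          if d.contains seq then d.modify seq [] (fun ps => ps ++ [i])
          else d.insert seq [i]
        else d)
      PySem.Dict.empty
  seq_positions.items.filter (fun p => decide (1 < p.2.length))

-- calculate_distances: positions[k+1] - positions[k]; both indices are always in range for
-- k in range(len(positions) - 1), so pyGetD's default 0 is never used (exact).
def calculate_distances (positions : List Int) : List Int :=
  (PySem.List.pyRange 0 ((positions.length : Int) - 1)).map
    (fun k => PySem.List.pyGetD positions (k + 1) 0 - PySem.List.pyGetD positions k 0)

-- find_repeated_sequences: Python's `sequences[seq].append(distances)` branch would nest a list
-- inside a list of ints (not a List Int value); inside Pre_ (min_length ≥ 0) it never fires,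
-- because keys coming from distinct lengths are distinct strings — modelled as leaving d unchanged.
def find_repeated_sequences (text : String) (min_length : Int) : List (String × List Int) :=
  let sequences : PySem.Dict String (List Int) :=
    (PySem.List.pyRange min_length (min_length + 10)).foldl
      (fun d length =>
        (extract_sequences text length).foldl
          (fun d p =>
            let distances := calculate_distances p.2
            if d.contains p.1 then d else d.insert p.1 distances)
          d)
      PySem.Dict.empty
  sequences.items

-- ===== PORT B =====
-- literal port of Source B: substring table per length, dict.fromkeys dedup (= PySem.List.dedup),
-- one gathering scan per key via zip(range, subs), gaps via zip(positions, positions[1:]).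
def find_repeated_sequences_alt (text : String) (min_length : Int) : List (String × List Int) :=
  let t := PySem.Str.upper text
  let n : Int := PySem.Str.len t
  let result : PySem.Dict String (List Int) :=
    (PySem.List.pyRange min_length (min_length + 10)).foldl
      (fun d length =>
        let subs := (PySem.List.pyRange 0 (n - length + 1)).map
          (fun i => PySem.Str.slice t (some i) (some (i + length)))
        (PySem.List.dedup (subs.filter PySem.Str.strIsalpha)).foldl
          (fun d seq =>
            let positions := (((PySem.List.pyRange 0 (n - length + 1)).zip subs).filter
              (fun p => p.2 == seq)).map (fun p => p.1)
            if 1 < positions.length then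
              d.insert seq ((positions.zip (PySem.List.slice positions (some 1) none)).map
                (fun p => p.2 - p.1))
            else d)
          d)
      PySem.Dict.empty
  result.items

-- ===== PRECONDITION & SPEC =====
-- Pre_ excludes min_length < 0: there window lengths are negative, Python's end-relative slicing
-- makes the same key recur across lengths and A stores a nested list (e.g. [2, [2]]) — not a
-- value of type List Int.
def Pre_find_repeated_sequences (text : String) (min_length : Int) : Prop := 0 ≤ min_length
instance (text : String) (min_length : Int) : Decidable (Pre_find_repeated_sequences text min_length) := by unfold Pre_find_repeated_sequences; infer_instance
def pvWitness_find_repeated_sequences : String × Int := ("ABCxABC", 3)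

def Spec_find_repeated_sequences (text : String) (min_length : Int) (out : List (String × List Int)) : Prop := out = find_repeated_sequences_alt text min_length
instance (text : String) (min_length : Int) (out : List (String × List Int)) : Decidable (Spec_find_repeated_sequences text min_length out) := by unfold Spec_find_repeated_sequences; infer_instance

-- ===== CLAIM (what is proved, stated in full; the proofs are below) =====
def Claim_equal_find_repeated_sequences : Prop := ∀ (text : String) (min_length : Int), Dom_find_repeated_sequences text min_length → Pre_find_repeated_sequences text min_length → Spec_find_repeated_sequences text min_length (find_repeated_sequences text min_length)

-- ===== LEMMAS AND PROOFS =====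

-- shared proof-side vocabulary (t is the uppercased text)
def keyF (t : String) (L : Int) (i : Int) : String := PySem.Str.slice t (some i) (some (i + L))
def rngL (t : String) (L : Int) : List Int := PySem.List.pyRange 0 (PySem.Str.len t - L + 1)
def alphaIdx (t : String) (L : Int) : List Int := (rngL t L).filter (fun i => PySem.Str.strIsalpha (keyF t L i))
def posOf (t : String) (L : Int) (seq : String) : List Int := (alphaIdx t L).filter (fun i => keyF t L i == seq)
def dedupKeys (t : String) (L : Int) : List String := PySem.List.dedup ((alphaIdx t L).map (keyF t L))
def pairsL (t : String) (L : Int) : List (String × List Int) := (dedupKeys t L).map (fun seq => (seq, posOf t L seq))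
def distsZ (pos : List Int) : List Int := (pos.zip (PySem.List.slice pos (some 1) none)).map (fun p => p.2 - p.1)
def Abody (text : String) (d : PySem.Dict String (List Int)) (length : Int) : PySem.Dict String (List Int) :=
  (extract_sequences text length).foldl
    (fun d p =>
      let distances := calculate_distances p.2
      if d.contains p.1 then d else d.insert p.1 distances) d
def Bbody (t : String) (d : PySem.Dict String (List Int)) (L : Int) : PySem.Dict String (List Int) :=
  (PySem.List.dedup (((rngL t L).map (keyF t L)).filter PySem.Str.strIsalpha)).foldl
    (fun d seq =>
      if 1 < ((((rngL t L).zip ((rngL t L).map (keyF t L))).filter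
          (fun p => p.2 == seq)).map (fun p => p.1)).length then
        d.insert seq (distsZ ((((rngL t L).zip ((rngL t L).map (keyF t L))).filter
          (fun p => p.2 == seq)).map (fun p => p.1)))
      else d) d

lemma portA_eq (text : String) (m : Int) :
    find_repeated_sequences text m
      = ((PySem.List.pyRange m (m + 10)).foldl (Abody text) PySem.Dict.empty).items := rfl

lemma portB_eq (text : String) (m : Int) :
    find_repeated_sequences_alt text m
      = ((PySem.List.pyRange m (m + 10)).foldl
          (Bbody (PySem.Str.upper text)) PySem.Dict.empty).items := rfl

lemma nodup_pyRange_one (a b : Int) : (PySem.List.pyRange a b).Nodup := by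
  rw [PySem.List.pyRange_of_pos a b (by norm_num)]
  refine List.Nodup.map ?_ List.nodup_range
  intro x y h
  simp only at h
  omega

lemma modify_or_insert (d : PySem.Dict String (List Int)) (k : String) (i : Int) :
    (if d.contains k then d.modify k [] (fun ps => ps ++ [i]) else d.insert k [i])
      = d.modify k [] (fun ps => ps ++ [i]) := by
  by_cases h : d.contains k
  · simp [h]
  · simp only [Bool.not_eq_true] at h
    simp [h, PySem.Dict.modify, PySem.Dict.getD_of_not_contains _ _ h]

lemma extract_eq (text : String) (L : Int) :
    extract_sequences text L
      = (pairsL (PySem.Str.upper text) L).filter (fun p => decide (1 < p.2.length)) := by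
  have h1 : extract_sequences text L
      = ((rngL (PySem.Str.upper text) L).foldl (fun d i =>
          if PySem.Str.strIsalpha (keyF (PySem.Str.upper text) L i) then
            if d.contains (keyF (PySem.Str.upper text) L i) then
              d.modify (keyF (PySem.Str.upper text) L i) [] (fun ps => ps ++ [i])
            else d.insert (keyF (PySem.Str.upper text) L i) [i]
          else d) PySem.Dict.empty).items.filter (fun p => decide (1 < p.2.length)) := rfl
  rw [h1]
  set t := PySem.Str.upper text with ht
  rw [PySem.List.foldl_congr_mem _ _
      (fun d i => if PySem.Str.strIsalpha (keyF t L i) then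
        d.modify (keyF t L i) [] (fun ps => ps ++ [i]) else d) _
      (by
        intro d i _
        by_cases ha : PySem.Str.strIsalpha (keyF t L i) <;>
          simp only [ha, if_true, modify_or_insert])]
  have hstep2 := PySem.List.foldl_if_eq_foldl_filter
      (fun i => PySem.Str.strIsalpha (keyF t L i))
      (fun (d : PySem.Dict String (List Int)) i =>
        d.modify (keyF t L i) [] (fun ps => ps ++ [i])) (rngL t L) PySem.Dict.empty
  rw [hstep2]
  set D := ((rngL t L).filter (fun i => PySem.Str.strIsalpha (keyF t L i))).foldl
      (fun d i => d.modify (keyF t L i) [] (fun ps => ps ++ [i])) PySem.Dict.empty with hD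
  have halpha : ((rngL t L).filter (fun i => PySem.Str.strIsalpha (keyF t L i))) = alphaIdx t L := rfl
  have hnd : D.keys.Nodup :=
    PySem.Dict.nodup_keys_foldl_modify_key _ _ _ _ _ PySem.Dict.nodup_keys_empty
  have hkeys : D.keys = dedupKeys t L := by
    rw [hD, halpha, PySem.Dict.keys_foldl_modify_key, PySem.Dict.keys_empty,
      PySem.Set.update_nil_left]
    rfl
  have hgetD : ∀ k, D.getD k [] = posOf t L k := by
    intro k
    have hmap : D = ((alphaIdx t L).map (fun i => (keyF t L i, i))).foldl
        (fun d p => d.modify p.1 [] (fun x => x ++ [p.2])) PySem.Dict.empty := by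
      rw [hD, halpha, List.foldl_map]
    rw [hmap, PySem.Dict.getD_foldl_modify_append]
    simp only [PySem.Dict.getD_empty, List.nil_append, List.filter_map, List.map_map,
      Function.comp_def]
    simp [posOf]
  rw [PySem.Dict.items_eq_map_keys D hnd [], hkeys]
  unfold pairsL
  congr 1
  exact List.map_congr_left (fun seq _ => by rw [hgetD seq])

lemma key_length (t : String) (L : Int) (hL : 0 ≤ L) (i : Int) (hi : i ∈ rngL t L) :
    ((keyF t L i).toList.length : Int) = L := by
  have hi' := PySem.List.mem_pyRange_one.mp hi
  have hlen : PySem.Str.len t = (t.toList.length : Int) := by simp [PySem.Str.len_eq]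
  rw [hlen] at hi'
  have h2 : (keyF t L i).toList = PySem.List.slice t.toList (some i) (some (i + L)) := by
    simp [keyF]
  rw [h2, PySem.List.length_slice]
  have c1 : PySem.List.clampIdx t.toList.length (i + L) = (i + L).toNat := by
    simp only [PySem.List.clampIdx]; split_ifs <;> omega
  have c2 : PySem.List.clampIdx t.toList.length i = i.toNat := by
    simp only [PySem.List.clampIdx]; split_ifs <;> omega
  rw [c1, c2]; omega

lemma mem_dedupKeys_mem_map (t : String) (L : Int) (seq : String)
    (h : seq ∈ dedupKeys t L) : ∃ i ∈ alphaIdx t L, keyF t L i = seq := by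
  have h' : seq ∈ (alphaIdx t L).map (keyF t L) := by
    have := (PySem.Set.mem_ofList ((alphaIdx t L).map (keyF t L)) seq).mp h
    exact this
  obtain ⟨i, hi, hk⟩ := List.mem_map.mp h'
  exact ⟨i, hi, hk⟩

lemma mem_dedupKeys_length (t : String) (L : Int) (hL : 0 ≤ L) (seq : String)
    (h : seq ∈ dedupKeys t L) : ((seq.toList.length : Int)) = L := by
  obtain ⟨i, hi, hk⟩ := mem_dedupKeys_mem_map t L seq h
  have hr : i ∈ rngL t L := (List.mem_filter.mp hi).1
  rw [← hk]
  exact key_length t L hL i hr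

lemma mem_dedupKeys_alpha (t : String) (L : Int) (seq : String)
    (h : seq ∈ dedupKeys t L) : PySem.Str.strIsalpha seq = true := by
  obtain ⟨i, hi, hk⟩ := mem_dedupKeys_mem_map t L seq h
  have := (List.mem_filter.mp hi).2
  rw [← hk]
  simpa using this

lemma dists_eq (pos : List Int) : calculate_distances pos = distsZ pos := by
  unfold calculate_distances distsZ
  rw [PySem.List.slice_from_one]
  cases pos with
  | nil => rfl
  | cons x xs =>
    have hc : (((x :: xs).length : Int) - 1) = ((xs.length : Nat) : Int) := by
      simp
    rw [hc, PySem.List.pyRange_zero_natCast, List.map_map]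
    refine List.ext_getElem ?_ ?_
    · simp [List.length_zip]
    · intro k h1 h2
      simp only [List.getElem_map, List.getElem_range, Function.comp_apply, List.getElem_zip]
      have hk : k < xs.length := by simpa using h1
      have hcast : ((k : Int) + 1) = (((k + 1 : Nat) : Nat) : Int) := by push_cast; ring
      rw [hcast, PySem.List.pyGetD_natCast, PySem.List.pyGetD_natCast]
      have hk1 : k + 1 < (x :: xs).length := by simp; omega
      have hk0 : k < (x :: xs).length := by simp; omega
      rw [List.getD_eq_getElem _ _ hk1, List.getD_eq_getElem _ _ hk0]
      have ht : (x :: xs).tail[k]'(by simpa using hk) = (x :: xs)[k + 1]'hk1 :=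
        List.getElem_tail _
      simp only [List.tail_cons] at ht ⊢
      rw [ht]

lemma fold_insert_branch (f : String × List Int → List Int)
    (pairs : List (String × List Int)) (d : PySem.Dict String (List Int))
    (hfresh : ∀ p ∈ pairs, d.contains p.1 = false)
    (hnd : (pairs.map (·.1)).Nodup) :
    pairs.foldl (fun d p => if d.contains p.1 then d else d.insert p.1 (f p)) d
      = pairs.foldl (fun d p => d.insert p.1 (f p)) d := by
  induction pairs generalizing d with
  | nil => rfl
  | cons p rest ih =>
    simp only [List.foldl_cons]
    have hp : d.contains p.1 = false := hfresh p (List.mem_cons_self)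
    rw [hp]
    simp only [Bool.false_eq_true, if_false]
    have hnd0 : (p.1 :: rest.map (·.1)).Nodup := by
      rw [List.map_cons] at hnd; exact hnd
    have hnd' := List.nodup_cons.mp hnd0
    refine ih _ ?_ hnd'.2
    intro q hq
    rw [PySem.Dict.contains_insert]
    have h1 : d.contains q.1 = false := hfresh q (List.mem_cons_of_mem _ hq)
    have h2 : (q.1 == p.1) = false := by
      have hne : q.1 ≠ p.1 := by
        intro he
        exact hnd'.1 (he ▸ List.mem_map_of_mem hq)
      simp [hne]
    rw [h1, h2]
    rfl

lemma posOf_zip (t : String) (L : Int) (seq : String)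
    (halpha : PySem.Str.strIsalpha seq = true) :
    (((rngL t L).zip ((rngL t L).map (keyF t L))).filter
        (fun p => p.2 == seq)).map (fun p => p.1) = posOf t L seq := by
  rw [← List.map_prod_left_eq_zip, List.filter_map, List.map_map]
  have hid : ((fun (p : Int × String) => p.1) ∘ fun i => (i, keyF t L i)) = id := rfl
  rw [hid, List.map_id]
  unfold posOf alphaIdx
  rw [List.filter_filter]
  refine List.filter_congr ?_
  intro i _
  simp only [Function.comp_apply]
  by_cases h : keyF t L i = seq
  · subst h
    have hc : PySem.Chars.strIsalpha (keyF t L i).toList = true := by simpa using halpha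
    simp [hc]
  · simp [h]

lemma bodyEq (text : String) (L : Int) (d : PySem.Dict String (List Int)) (hL : 0 ≤ L)
    (hnd : d.keys.Nodup)
    (hfresh : ∀ k ∈ d.keys, ((k.toList.length : Int)) ≠ L) :
    Abody text d L = Bbody (PySem.Str.upper text) d L := by
  have hfst : (pairsL (PySem.Str.upper text) L).map (·.1) = dedupKeys (PySem.Str.upper text) L := by
    unfold pairsL
    rw [List.map_map]
    exact List.map_id _
  have hndK : (dedupKeys (PySem.Str.upper text) L).Nodup := PySem.Set.nodup_ofList _
  -- A side: kill the dead contains-branch, replace calculate_distances by distsZ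
  have hA : Abody text d L
      = ((pairsL (PySem.Str.upper text) L).filter (fun p => decide (1 < p.2.length))).foldl
          (fun d p => d.insert p.1 (distsZ p.2)) d := by
    have h0 : Abody text d L
        = ((pairsL (PySem.Str.upper text) L).filter (fun p => decide (1 < p.2.length))).foldl
            (fun d p => if d.contains p.1 then d else d.insert p.1 (calculate_distances p.2)) d := by
      unfold Abody
      rw [extract_eq]
    rw [h0]
    rw [fold_insert_branch (fun p => calculate_distances p.2) _ d ?_ ?_]
    · exact PySem.List.foldl_congr_mem _ _ _ _
        (fun acc p _ => by rw [dists_eq])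
    · intro p hp
      have hmem : p.1 ∈ dedupKeys (PySem.Str.upper text) L := by
        rw [← hfst]
        exact List.mem_map_of_mem (List.mem_of_mem_filter hp)
      have hlenp := mem_dedupKeys_length _ L hL p.1 hmem
      have hnotin : p.1 ∉ d.keys := fun hin => hfresh p.1 hin hlenp
      rw [PySem.Dict.contains_eq_decide_mem_keys]
      simpa using hnotin
    · -- nodup of the filtered key list, via Sublist
      exact List.Nodup.sublist
        (List.Sublist.map (fun (p : String × List Int) => p.1) List.filter_sublist) (hfst ▸ hndK)
  -- B side
  have hB : Bbody (PySem.Str.upper text) d L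
      = ((pairsL (PySem.Str.upper text) L).filter (fun p => decide (1 < p.2.length))).foldl
          (fun d p => d.insert p.1 (distsZ p.2)) d := by
    set t := PySem.Str.upper text with ht
    have h0 : Bbody t d L
        = (dedupKeys t L).foldl (fun d seq =>
            if 1 < ((((rngL t L).zip ((rngL t L).map (keyF t L))).filter
                (fun p => p.2 == seq)).map (fun p => p.1)).length then
              d.insert seq (distsZ ((((rngL t L).zip ((rngL t L).map (keyF t L))).filter
                (fun p => p.2 == seq)).map (fun p => p.1)))
            else d) d := by
      unfold Bbody dedupKeys alphaIdx
      rw [List.filter_map, Function.comp_def]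
    rw [h0]
    rw [PySem.List.foldl_congr_mem _ _
        (fun d seq => if decide (1 < (posOf t L seq).length) = true then
          d.insert seq (distsZ (posOf t L seq)) else d) _ ?_]
    · rw [show (pairsL t L) = (dedupKeys t L).map (fun seq => (seq, posOf t L seq)) from rfl,
        ← PySem.List.foldl_if_eq_foldl_filter (fun p => decide (1 < p.2.length))
          (fun (d : PySem.Dict String (List Int)) (p : String × List Int) =>
            d.insert p.1 (distsZ p.2)), List.foldl_map]
    · intro acc seq hseq
      have halpha := mem_dedupKeys_alpha t L seq hseq
      rw [posOf_zip t L seq halpha]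
      by_cases hl : 1 < (posOf t L seq).length
      · simp [hl]
      · simp [hl]
  rw [hA, hB]

lemma keys_fold_generic (f : String × List Int → List Int) (pairs : List (String × List Int))
    (d : PySem.Dict String (List Int)) (hnd : d.keys.Nodup) :
    (pairs.foldl (fun d p => if d.contains p.1 then d else d.insert p.1 (f p)) d).keys.Nodup ∧
      ∀ k ∈ (pairs.foldl (fun d p => if d.contains p.1 then d else d.insert p.1 (f p)) d).keys,
        k ∈ d.keys ∨ k ∈ pairs.map (·.1) := by
  induction pairs generalizing d with
  | nil => exact ⟨hnd, fun k hk => Or.inl hk⟩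
  | cons p rest ih =>
    simp only [List.foldl_cons]
    by_cases h : d.contains p.1 = true
    · rw [if_pos h]
      obtain ⟨h1, h2⟩ := ih d hnd
      refine ⟨h1, fun k hk => ?_⟩
      rcases h2 k hk with hin | hm
      · exact Or.inl hin
      · right
        simp only [List.map_cons, List.mem_cons]
        exact Or.inr hm
    · rw [if_neg h]
      obtain ⟨h1, h2⟩ := ih (d.insert p.1 (f p)) (PySem.Dict.nodup_keys_insert d p.1 (f p) hnd)
      refine ⟨h1, fun k hk => ?_⟩
      rcases h2 k hk with hin | hm
      · rcases (PySem.Dict.mem_keys_insert d p.1 k (f p)).mp hin with he | hd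
        · right
          simp only [List.map_cons, List.mem_cons]
          exact Or.inl he
        · exact Or.inl hd
      · right
        simp only [List.map_cons, List.mem_cons]
        exact Or.inr hm

lemma keys_after (text : String) (L : Int) (d : PySem.Dict String (List Int)) (hnd : d.keys.Nodup) :
    (Abody text d L).keys.Nodup ∧
      ∀ k ∈ (Abody text d L).keys, k ∈ d.keys ∨ k ∈ dedupKeys (PySem.Str.upper text) L := by
  have hA : Abody text d L
      = ((pairsL (PySem.Str.upper text) L).filter (fun p => decide (1 < p.2.length))).foldl
          (fun d p => if d.contains p.1 then d
            else d.insert p.1 ((fun (q : String × List Int) => calculate_distances q.2) p)) d := by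
    unfold Abody
    rw [extract_eq]
  rw [hA]
  obtain ⟨h1, h2⟩ := keys_fold_generic (fun q => calculate_distances q.2)
    ((pairsL (PySem.Str.upper text) L).filter (fun p => decide (1 < p.2.length))) d hnd
  refine ⟨h1, fun k hk => ?_⟩
  rcases h2 k hk with h | h
  · exact Or.inl h
  · right
    obtain ⟨p, hp, hpk⟩ := List.mem_map.mp h
    have hmem : p.1 ∈ (pairsL (PySem.Str.upper text) L).map (fun x => x.1) :=
      List.mem_map_of_mem (List.mem_of_mem_filter hp)
    have hfst : (pairsL (PySem.Str.upper text) L).map (fun x => x.1)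
        = dedupKeys (PySem.Str.upper text) L := by
      unfold pairsL
      rw [List.map_map]
      exact List.map_id _
    rw [hfst] at hmem
    exact hpk ▸ hmem

lemma outer_fold (text : String) (Ls : List Int) (hpos : ∀ L ∈ Ls, 0 ≤ L) (hndL : Ls.Nodup)
    (d : PySem.Dict String (List Int)) (hnd : d.keys.Nodup)
    (hfresh : ∀ k ∈ d.keys, ∀ L ∈ Ls, ((k.toList.length : Int)) ≠ L) :
    Ls.foldl (Abody text) d
      = Ls.foldl (Bbody (PySem.Str.upper text)) d := by
  induction Ls generalizing d hnd with
  | nil => rfl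
  | cons L rest ih =>
    have hL0 : 0 ≤ L := hpos L List.mem_cons_self
    have hndL' := List.nodup_cons.mp hndL
    simp only [List.foldl_cons]
    have hstep : Abody text d L = Bbody (PySem.Str.upper text) d L :=
      bodyEq text L d hL0 hnd (fun k hk => hfresh k hk L List.mem_cons_self)
    rw [← hstep]
    obtain ⟨h1, h2⟩ := keys_after text L d hnd
    refine ih (fun L' hL' => hpos L' (List.mem_cons_of_mem _ hL')) hndL'.2 _ h1 ?_
    intro k hk L' hL'
    rcases h2 k hk with hm | hm
    · exact hfresh k hm L' (List.mem_cons_of_mem _ hL')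
    · have hkL := mem_dedupKeys_length (PySem.Str.upper text) L hL0 k hm
      intro he
      exact hndL'.1 ((hkL.symm.trans he) ▸ hL')

-- ===== VERDICT (by name: the statement is the Claim_ definition above) =====
theorem find_repeated_sequences_spec : Claim_equal_find_repeated_sequences := by
  intro text m _ hpre
  unfold Pre_find_repeated_sequences at hpre
  unfold Spec_find_repeated_sequences
  rw [portA_eq, portB_eq, outer_fold]
  · intro L hL
    have := PySem.List.mem_pyRange_one.mp hL
    omega
  · exact nodup_pyRange_one m (m + 10)
  · exact PySem.Dict.nodup_keys_empty
  · simp [PySem.Dict.keys_empty]
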